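-- pv_equiv track=rewrite | github.com/Deiby12/UNIR | tablas.py | generate_subexpressions
-- ===== SOURCE A (Python) =====
-- def generate_subexpressions(expr):
--     """
--     Extrae subexpresiones *entre paréntesis* (para mostrarlas como columnas intermedias).
--     No incluye la expresión completa.
--     """
--     subexpressions = set()
--     open_pos = []
--
--     for i, char in enumerate(expr):
--         if char == '(':
--             open_pos.append(i)
--         elif char == ')' and open_pos:
--             start = open_pos.pop()
--             subexpr = expr[start:i+1]
--             if len(subexpr) > 2:  # Evitamos paréntesis vacíos
--                 subexpressions.add(subexpr)
--
--     # Ordenamos por longitud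
--     subexpr_list = list(subexpressions)
--     subexpr_list.sort(key=len)
--     return subexpr_list
-- ===== SOURCE B (Python) =====
-- def _match_close(expr, start):
--     """Index of the ')' matching the '(' at position start, or None if unmatched."""
--     depth = 1
--     for j in range(start + 1, len(expr)):
--         c = expr[j]
--         if c == '(':
--             depth += 1
--         elif c == ')':
--             depth -= 1
--             if depth == 0:
--                 return j
--     return None
--
--
-- def generate_subexpressions(expr):
--     found = set()
--     for start, ch in enumerate(expr):
--         if ch == '(':
--             end = _match_close(expr, start)
--             if end is not None:
--                 subexpr = expr[start:end + 1]
--                 if len(subexpr) > 2: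
--                     found.add(subexpr)
--     return sorted(found, key=len)
-- ===== Notes on version B (the rewrite author's own statement) =====
-- stated objective: alternative
-- what changed: B drops A's single-pass stack of open positions entirely: for each opening parenthesis it runs an independent forward depth-counter scan to its matching closer and collects the slice; Pre_ excludes strings with two distinct parenthesized subexpressions of equal length, where the order among equal-length results depends on Python's hash-based set iteration order, so neither order is specified.
-- outside the precondition, e.g. on generate_subexpressions('((())b)(ab)'): A returns ['(())', '(ab)', '((())b)'], B returns ['(ab)', '(())', '((())b)']
import Mathlib
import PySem

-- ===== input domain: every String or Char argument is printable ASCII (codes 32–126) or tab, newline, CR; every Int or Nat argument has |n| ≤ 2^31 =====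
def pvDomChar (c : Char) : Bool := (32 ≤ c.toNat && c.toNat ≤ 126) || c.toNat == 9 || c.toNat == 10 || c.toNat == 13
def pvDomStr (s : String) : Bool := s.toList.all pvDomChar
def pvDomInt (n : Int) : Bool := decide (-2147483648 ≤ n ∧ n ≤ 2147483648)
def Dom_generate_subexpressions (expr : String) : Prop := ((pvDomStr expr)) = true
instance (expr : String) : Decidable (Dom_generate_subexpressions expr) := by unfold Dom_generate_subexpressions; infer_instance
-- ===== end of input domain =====

-- B replaces A's stack of open positions with an independent depth-counter scan from each opening parenthesis; alternative decomposition, not faster.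

-- ===== PORT A =====
-- the loop body of A (named so the proofs can speak about it); Python's open_pos.append/pop() at the
-- list END is modelled as cons/head of the Lean list (top of stack = head), which is exact
def pvStepA (expr : String) (st : PySem.Set String × List Int) (p : Int × Char) :
    PySem.Set String × List Int :=
  if p.2 = '(' then (st.1, p.1 :: st.2)
  else if p.2 = ')' then
    match st.2 with
    | [] => st   -- 'elif char == ')' and open_pos:' — empty stack: no branch taken
    | start :: rest =>
      let subexpr := PySem.Str.slice expr (some start) (some (p.1 + 1))
      if 2 < PySem.Str.len subexpr then (PySem.Set.add st.1 subexpr, rest) else (st.1, rest)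
  else st

def generate_subexpressions (expr : String) : List String :=
  let fin := (PySem.List.enumerate expr.toList 0).foldl (pvStepA expr) (PySem.Set.empty, [])
  PySem.List.sorted fin.1 (fun s => PySem.Str.len s)

-- ===== PORT B =====
-- port of Source B's _match_close: scanning the characters AFTER the '(' with the running depth;
-- returns the OFFSET q of the matching ')' within that suffix (absolute index = start + 1 + q)
def pvScan : List Char → Nat → Option Nat
  | [], _ => none
  | c :: rest, d =>
    if c = '(' then (pvScan rest (d + 1)).map (· + 1)
    else if c = ')' then
      if d = 1 then some 0 else (pvScan rest (d - 1)).map (· + 1)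
    else (pvScan rest d).map (· + 1)

-- the loop body of B; p.1 ≥ 0 always (enumerate from 0), so (p.1 + 1).toNat is exact
def pvStepB (expr : String) (found : PySem.Set String) (p : Int × Char) : PySem.Set String :=
  if p.2 = '(' then
    match pvScan (expr.toList.drop (p.1 + 1).toNat) 1 with
    | some q =>
      let subexpr := PySem.Str.slice expr (some p.1) (some (p.1 + (q : Int) + 2))
      if 2 < PySem.Str.len subexpr then PySem.Set.add found subexpr else found
    | none => found
  else found

def generate_subexpressions_alt (expr : String) : List String :=
  let found := (PySem.List.enumerate expr.toList 0).foldl (pvStepB expr) PySem.Set.empty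
  PySem.List.sorted found (fun s => PySem.Str.len s)

-- ===== PRECONDITION & SPEC =====
-- the distinct parenthesized subexpressions of expr (as a set, insertion order by '(' position)
def pvPairs (expr : String) : List String :=
  PySem.Set.ofList ((List.range expr.toList.length).filterMap (fun i =>
    if expr.toList[i]? = some '(' then
      (pvScan (expr.toList.drop (i + 1)) 1).bind (fun q =>
        let sub := PySem.Str.slice expr (some (i : Int)) (some ((i : Int) + (q : Int) + 2))
        if 2 < PySem.Str.len sub then some sub else none)
    else none))

-- Pre_ excludes strings in which two DISTINCT parenthesized subexpressions have the same length:
-- there the order among the equal-length results depends on Python's hash-based set iteration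
-- order, so neither A's nor B's tie order is specified. This tie condition is a property of the
-- matched subexpressions themselves, so deciding it necessarily computes the matching (pvScan).
def Pre_generate_subexpressions (expr : String) : Prop :=
  ((pvPairs expr).map (fun s => PySem.Str.len s)).Nodup

instance (expr : String) : Decidable (Pre_generate_subexpressions expr) := by
  unfold Pre_generate_subexpressions; infer_instance

def pvWitness_generate_subexpressions : String := "a(b(c)d)e"

def Spec_generate_subexpressions (expr : String) (out : List String) : Prop :=
  out = generate_subexpressions_alt expr

instance (expr : String) (out : List String) : Decidable (Spec_generate_subexpressions expr out) := by
  unfold Spec_generate_subexpressions; infer_instance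

-- ===== CLAIM (what is proved, stated in full; the proofs are below) =====
def Claim_equal_generate_subexpressions : Prop :=
  ∀ (expr : String), Dom_generate_subexpressions expr → Pre_generate_subexpressions expr →
    Spec_generate_subexpressions expr (generate_subexpressions expr)

-- ===== LEMMAS AND PROOFS =====

-- the subexpression whose '(' sits at absolute index i and whose ')' sits q+1 further right
def pvSub (expr : String) (i : Int) (q : Nat) : String :=
  PySem.Str.slice expr (some i) (some (i + q + 2))

-- the pop action of A: close the '(' at index i with the ')' at index j
def pvAdd (expr : String) (S : PySem.Set String) (i j : Int) : PySem.Set String :=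
  if 2 < PySem.Str.len (PySem.Str.slice expr (some i) (some (j + 1))) then
    PySem.Set.add S (PySem.Str.slice expr (some i) (some (j + 1)))
  else S
-- unfolding lemmas for pvScan
theorem pvScan_open (rest : List Char) (d : Nat) :
    pvScan ('(' :: rest) d = (pvScan rest (d + 1)).map (· + 1) := by simp [pvScan]
theorem pvScan_close (rest : List Char) (d : Nat) :
    pvScan (')' :: rest) d = if d = 1 then some 0 else (pvScan rest (d - 1)).map (· + 1) := by
  simp [pvScan]
theorem pvScan_other {c : Char} (rest : List Char) (d : Nat) (h1 : c ≠ '(') (h2 : c ≠ ')') :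
    pvScan (c :: rest) d = (pvScan rest d).map (· + 1) := by simp [pvScan, h1, h2]
-- === pvScan facts ===
theorem pvScan_closer : ∀ (l : List Char) (d q : Nat), pvScan l d = some q → l[q]? = some ')' := by
  intro l
  induction l with
  | nil => intro d q h; simp [pvScan] at h
  | cons c rest ih =>
    intro d q h
    simp only [pvScan] at h
    split_ifs at h with h1 h2 h3
    · cases hq : pvScan rest (d + 1) with
      | none => rw [hq] at h; simp at h
      | some r => rw [hq] at h; simp at h; subst h; simpa using ih _ _ hq
    · simp at h; subst h; simpa using h2
    · cases hq : pvScan rest (d - 1) with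
      | none => rw [hq] at h; simp at h
      | some r => rw [hq] at h; simp at h; subst h; simpa using ih _ _ hq
    · cases hq : pvScan rest d with
      | none => rw [hq] at h; simp at h
      | some r => rw [hq] at h; simp at h; subst h; simpa using ih _ _ hq

theorem pvScan_take : ∀ (l : List Char) (d q m : Nat), pvScan l d = some q → q < m →
    pvScan (l.take m) d = some q := by
  intro l
  induction l with
  | nil => intro d q m h; simp [pvScan] at h
  | cons c rest ih =>
    intro d q m h hm
    match m with
    | 0 => omega
    | m + 1 =>
      simp only [List.take_succ_cons]
      simp only [pvScan] at h ⊢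
      split_ifs at h ⊢ with h1 h2 h3
      · cases hq : pvScan rest (d + 1) with
        | none => rw [hq] at h; simp at h
        | some r => rw [hq] at h; simp at h; rw [ih _ _ m hq (by omega)]; simp; omega
      · exact h
      · cases hq : pvScan rest (d - 1) with
        | none => rw [hq] at h; simp at h
        | some r => rw [hq] at h; simp at h; rw [ih _ _ m hq (by omega)]; simp; omega
      · cases hq : pvScan rest d with
        | none => rw [hq] at h; simp at h
        | some r => rw [hq] at h; simp at h; rw [ih _ _ m hq (by omega)]; simp; omega

theorem pvScan_take' : ∀ (l : List Char) (d q m : Nat), pvScan (l.take m) d = some q →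
    pvScan l d = some q := by
  intro l
  induction l with
  | nil => intro d q m h; simp [pvScan] at h
  | cons c rest ih =>
    intro d q m h
    match m with
    | 0 => simp [pvScan] at h
    | m + 1 =>
      simp only [List.take_succ_cons] at h
      simp only [pvScan] at h ⊢
      split_ifs at h ⊢ with h1 h2 h3
      · cases hq : pvScan (rest.take m) (d + 1) with
        | none => rw [hq] at h; simp at h
        | some r => rw [hq] at h; simp at h; rw [ih _ _ m hq]; simp; omega
      · exact h
      · cases hq : pvScan (rest.take m) (d - 1) with
        | none => rw [hq] at h; simp at h
        | some r => rw [hq] at h; simp at h; rw [ih _ _ m hq]; simp; omega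
      · cases hq : pvScan (rest.take m) d with
        | none => rw [hq] at h; simp at h
        | some r => rw [hq] at h; simp at h; rw [ih _ _ m hq]; simp; omega
theorem pvScan_shift : ∀ (n : Nat) (l : List Char), l.length ≤ n → ∀ d : Nat, 1 ≤ d →
    pvScan l (d + 1) =
      (pvScan l 1).bind (fun q => (pvScan (l.drop (q + 1)) d).map (fun r => q + 1 + r)) := by
  intro n
  induction n with
  | zero =>
    intro l hl d hd
    have : l = [] := List.length_eq_zero_iff.mp (by omega)
    subst this; simp [pvScan]
  | succ n ih =>
    intro l hl d hd
    match l with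
    | [] => simp [pvScan]
    | c :: rest =>
      have hr : rest.length ≤ n := by simpa using hl
      by_cases h1 : c = '('
      · subst h1
        rw [pvScan_open, pvScan_open]
        rw [ih rest hr (d + 1) (by omega), ih rest hr 1 (by omega)]
        cases ha : pvScan rest 1 with
        | none => simp
        | some a =>
          have hda : (rest.drop (a + 1)).length ≤ n := by
            simp only [List.length_drop]; omega
          simp only [Option.bind_some]
          rw [ih _ hda d hd]
          cases hb : pvScan (rest.drop (a + 1)) 1 with
          | none => simp
          | some b =>
            simp only [Option.bind_some, Option.map_map, Option.map_some,
              List.drop_succ_cons, List.drop_drop]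
            rw [show a + 1 + b + 1 = a + 1 + (b + 1) from by omega]
            cases hc : pvScan (rest.drop (a + 1 + (b + 1))) d with
            | none => simp
            | some r => simp; omega
      · by_cases h2 : c = ')'
        · subst h2
          rw [pvScan_close, pvScan_close, if_neg (by omega : ¬ (d + 1 = 1)), if_pos rfl]
          simp only [Nat.add_sub_cancel, Option.bind_some, List.drop_succ_cons, List.drop_zero]
          cases hq : pvScan rest d with
          | none => simp
          | some r => simp; omega
        · rw [pvScan_other rest (d + 1) h1 h2, pvScan_other rest 1 h1 h2]
          rw [ih rest hr d hd]
          cases ha : pvScan rest 1 with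
          | none => simp
          | some a =>
            simp only [Option.bind_some, Option.map_some, Option.bind_some, List.drop_succ_cons]
            cases hb : pvScan (rest.drop (a + 1)) d with
            | none => simp
            | some r => simp; omega
theorem pvScan_nest : ∀ (n : Nat) (l : List Char), l.length ≤ n → ∀ q, pvScan l 1 = some q →
    ∀ i, i < q → l[i]? = some '(' →
    ∃ r, pvScan (l.drop (i + 1)) 1 = some r ∧ i + 1 + r < q := by
  intro n
  induction n with
  | zero =>
    intro l hl q hq
    have : l = [] := List.length_eq_zero_iff.mp (by omega)
    subst this; simp [pvScan] at hq
  | succ n ih =>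
    intro l hl q hq i hi hopen
    match l with
    | [] => simp [pvScan] at hq
    | c :: rest =>
      have hr : rest.length ≤ n := by simpa using hl
      by_cases h1 : c = '('
      · subst h1
        rw [pvScan_open] at hq
        cases h2 : pvScan rest 2 with
        | none => rw [h2] at hq; simp at hq
        | some q' =>
          rw [h2] at hq; simp at hq
          have hsh := pvScan_shift rest.length rest le_rfl 1 le_rfl
          rw [hsh] at h2
          cases ha : pvScan rest 1 with
          | none => rw [ha] at h2; simp at h2
          | some a =>
            rw [ha] at h2; simp only [Option.bind_some] at h2
            cases hb : pvScan (rest.drop (a + 1)) 1 with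
            | none => rw [hb] at h2; simp at h2
            | some b =>
              rw [hb] at h2; simp at h2
              -- q = a + b + 2 (hq : q' + 1 = q, h2 : a + 1 + b = q')
              match i with
              | 0 =>
                exact ⟨a, by simpa using ha, by omega⟩
              | Nat.succ i' =>
                have hopen' : rest[i']? = some '(' := by simpa using hopen
                have hlt : i' + 1 < q := hi
                rcases Nat.lt_trichotomy i' a with hc | hc | hc
                · obtain ⟨r, hr1, hr2⟩ := ih rest hr a ha i' hc hopen'
                  exact ⟨r, by simpa using hr1, by omega⟩
                · exfalso
                  have hcl := pvScan_closer rest 1 a ha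
                  rw [hc, hcl] at hopen'; simp at hopen'
                · -- i' > a : inside the drop part
                  have hj : i' - (a + 1) < b := by omega
                  have hopen'' : (rest.drop (a + 1))[i' - (a + 1)]? = some '(' := by
                    rw [List.getElem?_drop]
                    rw [show a + 1 + (i' - (a + 1)) = i' from by omega]
                    exact hopen'
                  have hda : (rest.drop (a + 1)).length ≤ n := by
                    simp only [List.length_drop]; omega
                  obtain ⟨r, hr1, hr2⟩ := ih (rest.drop (a + 1)) hda b hb _ hj hopen''
                  refine ⟨r, ?_, by omega⟩
                  rw [List.drop_drop] at hr1
                  rw [List.drop_succ_cons]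
                  rw [show i' + 1 = a + 1 + (i' - (a + 1) + 1) from by omega]
                  exact hr1
      · by_cases h2 : c = ')'
        · subst h2
          rw [pvScan_close, if_pos rfl] at hq
          simp at hq; omega
        · rw [pvScan_other rest 1 h1 h2] at hq
          cases ha : pvScan rest 1 with
          | none => rw [ha] at hq; simp at hq
          | some q' =>
            rw [ha] at hq; simp at hq
            match i with
            | 0 => simp at hopen; exact absurd hopen (by simpa using h1)
            | Nat.succ i' =>
              have hopen' : rest[i']? = some '(' := by simpa using hopen
              obtain ⟨r, hr1, hr2⟩ := ih rest hr q' ha i' (by omega) hopen'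
              exact ⟨r, by simpa using hr1, by omega⟩
-- === A's fold: unfolding ===
def pvFoldA (expr : String) (l : List Char) (k : Int) (st : PySem.Set String × List Int) :
    PySem.Set String × List Int :=
  (PySem.List.enumerate l k).foldl (pvStepA expr) st

theorem pvFoldA_nil (expr : String) (k : Int) (st : PySem.Set String × List Int) :
    pvFoldA expr [] k st = st := by
  simp [pvFoldA, PySem.List.enumerate]

theorem pvFoldA_cons (expr : String) (c : Char) (l : List Char) (k : Int)
    (st : PySem.Set String × List Int) :
    pvFoldA expr (c :: l) k st = pvFoldA expr l (k + 1) (pvStepA expr st (k, c)) := by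
  simp [pvFoldA, PySem.List.enumerate_cons]

theorem pvStepA_open (expr : String) (S : PySem.Set String) (st : List Int) (k : Int) :
    pvStepA expr (S, st) (k, '(') = (S, k :: st) := by simp [pvStepA]

theorem pvStepA_close_nil (expr : String) (S : PySem.Set String) (k : Int) :
    pvStepA expr (S, []) (k, ')') = (S, []) := by simp [pvStepA]

theorem pvStepA_close_cons (expr : String) (S : PySem.Set String) (i : Int) (st : List Int)
    (k : Int) : pvStepA expr (S, i :: st) (k, ')') = (pvAdd expr S i k, st) := by
  simp only [pvStepA, pvAdd]
  rw [if_neg (by decide : ¬ ((')' : Char) = '(')), if_pos trivial]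
  split_ifs <;> rfl

theorem pvStepA_other (expr : String) (S : PySem.Set String) (st : List Int) (k : Int)
    {c : Char} (h1 : c ≠ '(') (h2 : c ≠ ')') :
    pvStepA expr (S, st) (k, c) = (S, st) := by
  simp [pvStepA, h1, h2]
theorem pvSegA (expr : String) : ∀ (n : Nat) (l : List Char), l.length ≤ n →
    ∀ q, pvScan l 1 = some q → ∀ (k i : Int) (S : PySem.Set String) (st : List Int),
    pvFoldA expr l k (S, i :: st) =
      pvFoldA expr (l.drop (q + 1)) (k + q + 1)
        (pvAdd expr (pvFoldA expr (l.take q) k (S, [])).1 i (k + q), st) := by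
  intro n
  induction n with
  | zero =>
    intro l hl q hq
    have : l = [] := List.length_eq_zero_iff.mp (by omega)
    subst this; simp [pvScan] at hq
  | succ n ih =>
    intro l hl q hq k i S st
    match l with
    | [] => simp [pvScan] at hq
    | c :: rest =>
      have hr : rest.length ≤ n := by simpa using hl
      by_cases h1 : c = '('
      · subst h1
        rw [pvScan_open] at hq
        cases h2 : pvScan rest 2 with
        | none => rw [h2] at hq; simp at hq
        | some q' =>
          rw [h2] at hq; simp at hq
          rw [pvScan_shift rest.length rest le_rfl 1 le_rfl] at h2
          cases ha : pvScan rest 1 with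
          | none => rw [ha] at h2; simp at h2
          | some a =>
            rw [ha] at h2; simp only [Option.bind_some] at h2
            cases hb : pvScan (rest.drop (a + 1)) 1 with
            | none => rw [hb] at h2; simp at h2
            | some b =>
              rw [hb] at h2; simp at h2
              -- q' = a + 1 + b, q = q' + 1 = a + b + 2
              have hq2 : q = a + b + 2 := by omega
              subst hq2
              have hda : (rest.drop (a + 1)).length ≤ n := by
                simp only [List.length_drop]; omega
              have htk : (rest.take (a + b + 1)).length ≤ n := by
                simp only [List.length_take]; omega
              have hscantk : pvScan (rest.take (a + b + 1)) 1 = some a :=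
                pvScan_take rest 1 a (a + b + 1) ha (by omega)
              -- LHS
              rw [pvFoldA_cons, pvStepA_open]
              rw [ih rest hr a ha (k + 1) k S (i :: st)]
              rw [ih (rest.drop (a + 1)) hda b hb (k + 1 + a + 1) i _ st]
              -- RHS
              rw [show a + b + 2 + 1 = (a + 1 + (b + 1)) + 1 from by omega,
                  List.drop_succ_cons, ← List.drop_drop]
              rw [show (a + b + 2 : Nat) = (a + b + 1) + 1 from by omega, List.take_succ_cons]
              rw [pvFoldA_cons, pvStepA_open]
              rw [ih (rest.take (a + b + 1)) htk a hscantk (k + 1) k S []]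
              rw [List.take_take, show min a (a + b + 1) = a from by omega]
              rw [List.drop_take, show a + b + 1 - (a + 1) = b from by omega]
              have e1 : List.drop 1 (List.drop b (List.drop (a + 1) rest)) =
                  List.drop (a + 1 + (b + 1)) rest := by
                simp only [List.drop_drop]; congr 1
              rw [e1,
                show (k + 1 + (a : Int) + 1 + (b : Int) + 1) =
                    (k + ((a + b + 1 + 1 : Nat) : Int) + 1) from by push_cast; ring,
                show (k + 1 + (a : Int) + 1 + (b : Int)) =
                    (k + ((a + b + 1 + 1 : Nat) : Int)) from by push_cast; ring]
      · by_cases h2 : c = ')'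
        · subst h2
          rw [pvScan_close, if_pos rfl] at hq
          simp at hq
          subst hq
          rw [pvFoldA_cons, pvStepA_close_cons]
          simp only [List.drop_succ_cons, List.drop_zero, List.take_zero]
          rw [pvFoldA_nil]
          norm_num
        · rw [pvScan_other rest 1 h1 h2] at hq
          cases ha : pvScan rest 1 with
          | none => rw [ha] at hq; simp at hq
          | some q' =>
            rw [ha] at hq; simp at hq
            have hq2 : q = q' + 1 := by omega
            subst hq2
            rw [pvFoldA_cons, pvStepA_other expr S (i :: st) k h1 h2]
            rw [ih rest hr q' ha (k + 1) i S st]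
            simp only [List.drop_succ_cons, List.take_succ_cons]
            rw [pvFoldA_cons, pvStepA_other expr S ([] : List Int) k h1 h2]
            rw [show (k + ((q' + 1 : Nat) : Int) + 1) = (k + 1 + (q' : Int) + 1) from by push_cast; ring,
              show (k + ((q' + 1 : Nat) : Int)) = (k + 1 + (q' : Int)) from by push_cast; ring]
theorem pvFrameA (expr : String) : ∀ (n : Nat) (l : List Char), l.length ≤ n →
    pvScan l 1 = none → ∀ (k i : Int) (S : PySem.Set String) (st : List Int),
    (pvFoldA expr l k (S, i :: st)).1 = (pvFoldA expr l k (S, [])).1 := by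
  intro n
  induction n with
  | zero =>
    intro l hl hq k i S st
    have : l = [] := List.length_eq_zero_iff.mp (by omega)
    subst this; simp [pvFoldA_nil]
  | succ n ih =>
    intro l hl hq k i S st
    match l with
    | [] => simp [pvFoldA_nil]
    | c :: rest =>
      have hr : rest.length ≤ n := by simpa using hl
      by_cases h1 : c = '('
      · subst h1
        rw [pvScan_open] at hq
        cases h2 : pvScan rest 2 with
        | some q' => rw [h2] at hq; simp at hq
        | none =>
          rw [pvScan_shift rest.length rest le_rfl 1 le_rfl] at h2
          rw [pvFoldA_cons, pvStepA_open, pvFoldA_cons, pvStepA_open]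
          cases ha : pvScan rest 1 with
          | none =>
            rw [ih rest hr ha (k + 1) k S (i :: st), ih rest hr ha (k + 1) k S []]
          | some a =>
            rw [ha] at h2; simp only [Option.bind_some] at h2
            cases hb : pvScan (rest.drop (a + 1)) 1 with
            | some b => rw [hb] at h2; simp at h2
            | none =>
              have hda : (rest.drop (a + 1)).length ≤ n := by
                simp only [List.length_drop]; omega
              rw [pvSegA expr n rest hr a ha (k + 1) k S (i :: st),
                  pvSegA expr n rest hr a ha (k + 1) k S []]
              rw [ih (rest.drop (a + 1)) hda hb (k + 1 + a + 1) i _ st]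
      · by_cases h2 : c = ')'
        · subst h2
          rw [pvScan_close, if_pos rfl] at hq
          simp at hq
        · rw [pvScan_other rest 1 h1 h2] at hq
          cases ha : pvScan rest 1 with
          | some q' => rw [ha] at hq; simp at hq
          | none =>
            rw [pvFoldA_cons, pvStepA_other expr S (i :: st) k h1 h2,
                pvFoldA_cons, pvStepA_other expr S ([] : List Int) k h1 h2]
            exact ih rest hr ha (k + 1) i S st
-- the characterization predicate: x is a parenthesized subexpression of the block l placed at absolute offset k
def pvPairAt (expr : String) (l : List Char) (k : Int) (x : String) : Prop :=
  ∃ (i q : Nat), l[i]? = some '(' ∧ pvScan (l.drop (i + 1)) 1 = some q ∧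
    2 < PySem.Str.len (pvSub expr (k + i) q) ∧ x = pvSub expr (k + i) q

theorem pvPairAt_nil (expr : String) (k : Int) (x : String) : ¬ pvPairAt expr [] k x := by
  rintro ⟨i, q, hopen, -⟩; simp at hopen

theorem pvPairAt_cons_other (expr : String) {c : Char} (rest : List Char) (k : Int) (x : String)
    (h1 : c ≠ '(') : pvPairAt expr (c :: rest) k x ↔ pvPairAt expr rest (k + 1) x := by
  constructor
  · rintro ⟨i, q, hopen, hscan, hlen, hx⟩
    match i with
    | 0 => simp at hopen; exact absurd hopen h1
    | Nat.succ i' =>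
      refine ⟨i', q, by simpa using hopen, by simpa using hscan, ?_, ?_⟩
      · rwa [show (k + 1 + (i' : Int)) = (k + ((i' + 1 : Nat) : Int)) from by push_cast; ring]
      · rwa [show (k + 1 + (i' : Int)) = (k + ((i' + 1 : Nat) : Int)) from by push_cast; ring]
  · rintro ⟨i', q, hopen, hscan, hlen, hx⟩
    refine ⟨i' + 1, q, by simpa using hopen, by simpa using hscan, ?_, ?_⟩
    · rwa [show (k + ((i' + 1 : Nat) : Int)) = (k + 1 + (i' : Int)) from by push_cast; ring]
    · rwa [show (k + ((i' + 1 : Nat) : Int)) = (k + 1 + (i' : Int)) from by push_cast; ring]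

theorem pvPairAt_split (expr : String) (rest : List Char) (a : Nat) (k : Int) (x : String)
    (ha : pvScan rest 1 = some a) :
    pvPairAt expr rest k x ↔
      pvPairAt expr (rest.take a) k x ∨ pvPairAt expr (rest.drop (a + 1)) (k + a + 1) x := by
  constructor
  · rintro ⟨i, q, hopen, hscan, hlen, hx⟩
    rcases Nat.lt_trichotomy i a with hc | hc | hc
    · left
      obtain ⟨r, hr1, hr2⟩ := pvScan_nest rest.length rest le_rfl a ha i hc hopen
      rw [hscan] at hr1
      have hqr : q = r := by simpa using hr1
      refine ⟨i, q, ?_, ?_, hlen, hx⟩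
      · rwa [List.getElem?_take_of_lt hc]
      · rw [List.drop_take]
        exact pvScan_take _ 1 q _ hscan (by omega)
    · exfalso
      have := pvScan_closer rest 1 a ha
      rw [hc, this] at hopen; simp at hopen
    · right
      refine ⟨i - (a + 1), q, ?_, ?_, ?_, ?_⟩
      · rw [List.getElem?_drop, show a + 1 + (i - (a + 1)) = i from by omega]; exact hopen
      · rw [List.drop_drop, show a + 1 + (i - (a + 1) + 1) = i + 1 from by omega]
        exact hscan
      · rwa [show (k + (a : Int) + 1 + ((i - (a + 1) : Nat) : Int)) = (k + (i : Int)) from by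
          push_cast [show a + 1 ≤ i from by omega]; ring]
      · rwa [show (k + (a : Int) + 1 + ((i - (a + 1) : Nat) : Int)) = (k + (i : Int)) from by
          push_cast [show a + 1 ≤ i from by omega]; ring]
  · rintro (⟨i, q, hopen, hscan, hlen, hx⟩ | ⟨j, q, hopen, hscan, hlen, hx⟩)
    · have hia : i < a := by
        by_contra hge
        rw [List.getElem?_eq_none (by simp [List.length_take]; omega)] at hopen
        simp at hopen
      refine ⟨i, q, ?_, ?_, hlen, hx⟩
      · rwa [List.getElem?_take_of_lt hia] at hopen
      · rw [List.drop_take] at hscan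
        exact pvScan_take' _ 1 q _ hscan
    · refine ⟨a + 1 + j, q, ?_, ?_, ?_, ?_⟩
      · rwa [List.getElem?_drop] at hopen
      · rw [List.drop_drop, show a + 1 + (j + 1) = a + 1 + j + 1 from by omega] at hscan
        exact hscan
      · rwa [show (k + ((a + 1 + j : Nat) : Int)) = (k + (a : Int) + 1 + (j : Int)) from by
          push_cast; ring]
      · rwa [show (k + ((a + 1 + j : Nat) : Int)) = (k + (a : Int) + 1 + (j : Int)) from by
          push_cast; ring]
theorem pvPairAt_cons_open_none (expr : String) (rest : List Char) (k : Int) (x : String)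
    (ha : pvScan rest 1 = none) :
    pvPairAt expr ('(' :: rest) k x ↔ pvPairAt expr rest (k + 1) x := by
  constructor
  · rintro ⟨i, q, hopen, hscan, hlen, hx⟩
    match i with
    | 0 => rw [List.drop_succ_cons, List.drop_zero, ha] at hscan; simp at hscan
    | Nat.succ i' =>
      refine ⟨i', q, by simpa using hopen, by simpa using hscan, ?_, ?_⟩
      · rwa [show (k + 1 + (i' : Int)) = (k + ((i' + 1 : Nat) : Int)) from by push_cast; ring]
      · rwa [show (k + 1 + (i' : Int)) = (k + ((i' + 1 : Nat) : Int)) from by push_cast; ring]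
  · rintro ⟨i', q, hopen, hscan, hlen, hx⟩
    refine ⟨i' + 1, q, by simpa using hopen, by simpa using hscan, ?_, ?_⟩
    · rwa [show (k + ((i' + 1 : Nat) : Int)) = (k + 1 + (i' : Int)) from by push_cast; ring]
    · rwa [show (k + ((i' + 1 : Nat) : Int)) = (k + 1 + (i' : Int)) from by push_cast; ring]

theorem pvPairAt_cons_open_some (expr : String) (rest : List Char) (a : Nat) (k : Int)
    (x : String) (ha : pvScan rest 1 = some a) :
    pvPairAt expr ('(' :: rest) k x ↔
      ((2 < PySem.Str.len (pvSub expr k a) ∧ x = pvSub expr k a) ∨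
        pvPairAt expr rest (k + 1) x) := by
  constructor
  · rintro ⟨i, q, hopen, hscan, hlen, hx⟩
    match i with
    | 0 =>
      rw [List.drop_succ_cons, List.drop_zero, ha] at hscan
      have hqa : q = a := by simpa using hscan.symm
      subst hqa
      left
      rw [show (k + ((0 : Nat) : Int)) = k from by push_cast; ring] at hlen hx
      exact ⟨hlen, hx⟩
    | Nat.succ i' =>
      right
      refine ⟨i', q, by simpa using hopen, by simpa using hscan, ?_, ?_⟩
      · rwa [show (k + 1 + (i' : Int)) = (k + ((i' + 1 : Nat) : Int)) from by push_cast; ring]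
      · rwa [show (k + 1 + (i' : Int)) = (k + ((i' + 1 : Nat) : Int)) from by push_cast; ring]
  · rintro (⟨hlen, hx⟩ | ⟨i', q, hopen, hscan, hlen, hx⟩)
    · refine ⟨0, a, by simp, by simpa using ha, ?_, ?_⟩
      · rwa [show (k + ((0 : Nat) : Int)) = k from by push_cast; ring]
      · rwa [show (k + ((0 : Nat) : Int)) = k from by push_cast; ring]
    · refine ⟨i' + 1, q, by simpa using hopen, by simpa using hscan, ?_, ?_⟩
      · rwa [show (k + ((i' + 1 : Nat) : Int)) = (k + 1 + (i' : Int)) from by push_cast; ring]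
      · rwa [show (k + ((i' + 1 : Nat) : Int)) = (k + 1 + (i' : Int)) from by push_cast; ring]

theorem pvAdd_mem_sub (expr : String) (S : PySem.Set String) (i : Int) (q : Nat) (x : String) :
    x ∈ pvAdd expr S i (i + 1 + (q : Int)) ↔
      x ∈ S ∨ (2 < PySem.Str.len (pvSub expr i q) ∧ x = pvSub expr i q) := by
  have e : (i + 1 + (q : Int)) + 1 = i + (q : Int) + 2 := by ring
  unfold pvAdd pvSub
  rw [e]
  split_ifs with h
  · rw [PySem.Set.mem_add]
    exact or_congr Iff.rfl ⟨fun hx => ⟨h, hx⟩, fun hx => hx.2⟩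
  · constructor
    · exact fun hS => Or.inl hS
    · rintro (hS | ⟨hlen, -⟩)
      · exact hS
      · exact absurd hlen h

set_option maxHeartbeats 1000000 in
theorem pvMemA (expr : String) : ∀ (n : Nat) (l : List Char), l.length ≤ n →
    ∀ (k : Int) (S : PySem.Set String) (x : String),
    x ∈ (pvFoldA expr l k (S, [])).1 ↔ x ∈ S ∨ pvPairAt expr l k x := by
  intro n
  induction n with
  | zero =>
    intro l hl k S x
    have : l = [] := List.length_eq_zero_iff.mp (by omega)
    subst this
    rw [pvFoldA_nil]
    exact (or_iff_left (pvPairAt_nil expr k x)).symm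
  | succ n ih =>
    intro l hl k S x
    match l with
    | [] =>
      rw [pvFoldA_nil]
      exact (or_iff_left (pvPairAt_nil expr k x)).symm
    | c :: rest =>
      have hr : rest.length ≤ n := by simpa using hl
      by_cases h1 : c = '('
      · subst h1
        rw [pvFoldA_cons, pvStepA_open]
        cases ha : pvScan rest 1 with
        | none =>
          rw [pvFrameA expr n rest hr ha (k + 1) k S []]
          rw [ih rest hr (k + 1) S x, pvPairAt_cons_open_none expr rest k x ha]
        | some a =>
          have hda : (rest.drop (a + 1)).length ≤ n := by
            simp only [List.length_drop]; omega
          have htk : (rest.take a).length ≤ n := by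
            simp only [List.length_take]; omega
          rw [pvSegA expr n rest hr a ha (k + 1) k S []]
          rw [ih (rest.drop (a + 1)) hda (k + 1 + a + 1)
              (pvAdd expr (pvFoldA expr (rest.take a) (k + 1) (S, [])).1 k (k + 1 + a)) x]
          rw [pvAdd_mem_sub expr _ k a x]
          rw [ih (rest.take a) htk (k + 1) S x]
          rw [pvPairAt_cons_open_some expr rest a k x ha]
          rw [pvPairAt_split expr rest a (k + 1) x ha]
          tauto
      · by_cases h2 : c = ')'
        · subst h2
          rw [pvFoldA_cons, pvStepA_close_nil]
          rw [ih rest hr (k + 1) S x,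
              pvPairAt_cons_other expr rest k x (by decide : (')' : Char) ≠ '(')]
        · rw [pvFoldA_cons, pvStepA_other expr S ([] : List Int) k h1 h2]
          rw [ih rest hr (k + 1) S x, pvPairAt_cons_other expr rest k x h1]
-- === B's fold ===
def pvPairB (expr : String) (l : List Char) (k : Int) (x : String) : Prop :=
  ∃ (i q : Nat), l[i]? = some '(' ∧
    pvScan (expr.toList.drop (k + i + 1).toNat) 1 = some q ∧
    2 < PySem.Str.len (pvSub expr (k + i) q) ∧ x = pvSub expr (k + i) q

theorem pvPairB_nil (expr : String) (k : Int) (x : String) : ¬ pvPairB expr [] k x := by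
  rintro ⟨i, q, hopen, -⟩; simp at hopen

theorem pvPairB_cons (expr : String) (c : Char) (rest : List Char) (k : Int) (x : String) :
    pvPairB expr (c :: rest) k x ↔
      ((c = '(' ∧ ∃ q, pvScan (expr.toList.drop (k + 1).toNat) 1 = some q ∧
          2 < PySem.Str.len (pvSub expr k q) ∧ x = pvSub expr k q)
        ∨ pvPairB expr rest (k + 1) x) := by
  constructor
  · rintro ⟨i, q, hopen, hscan, hlen, hx⟩
    match i with
    | 0 =>
      left
      simp only [List.getElem?_cons_zero, Option.some_inj] at hopen
      rw [show (k + ((0 : Nat) : Int) + 1) = k + 1 from by push_cast; ring] at hscan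
      rw [show (k + ((0 : Nat) : Int)) = k from by push_cast; ring] at hlen hx
      exact ⟨hopen.symm ▸ rfl, q, hscan, hlen, hx⟩
    | Nat.succ i' =>
      right
      refine ⟨i', q, by simpa using hopen, ?_, ?_, ?_⟩
      · rwa [show (k + 1 + (i' : Int) + 1) = (k + ((i' + 1 : Nat) : Int) + 1) from by
          push_cast; ring]
      · rwa [show (k + 1 + (i' : Int)) = (k + ((i' + 1 : Nat) : Int)) from by push_cast; ring]
      · rwa [show (k + 1 + (i' : Int)) = (k + ((i' + 1 : Nat) : Int)) from by push_cast; ring]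
  · rintro (⟨hc, q, hscan, hlen, hx⟩ | ⟨i', q, hopen, hscan, hlen, hx⟩)
    · subst hc
      refine ⟨0, q, by simp, ?_, ?_, ?_⟩
      · rwa [show (k + ((0 : Nat) : Int) + 1) = k + 1 from by push_cast; ring]
      · rwa [show (k + ((0 : Nat) : Int)) = k from by push_cast; ring]
      · rwa [show (k + ((0 : Nat) : Int)) = k from by push_cast; ring]
    · refine ⟨i' + 1, q, by simpa using hopen, ?_, ?_, ?_⟩
      · rwa [show (k + ((i' + 1 : Nat) : Int) + 1) = (k + 1 + (i' : Int) + 1) from by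
          push_cast; ring]
      · rwa [show (k + ((i' + 1 : Nat) : Int)) = (k + 1 + (i' : Int)) from by push_cast; ring]
      · rwa [show (k + ((i' + 1 : Nat) : Int)) = (k + 1 + (i' : Int)) from by push_cast; ring]

theorem pvStepB_not_open (expr : String) (S : PySem.Set String) (k : Int) {c : Char}
    (h1 : c ≠ '(') : pvStepB expr S (k, c) = S := by
  simp [pvStepB, h1]

theorem pvStepB_open_none (expr : String) (S : PySem.Set String) (k : Int)
    (hm : pvScan (expr.toList.drop (k + 1).toNat) 1 = none) :
    pvStepB expr S (k, '(') = S := by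
  simp [pvStepB, hm]

theorem pvStepB_open_mem (expr : String) (S : PySem.Set String) (k : Int) (q : Nat) (x : String)
    (hm : pvScan (expr.toList.drop (k + 1).toNat) 1 = some q) :
    x ∈ pvStepB expr S (k, '(') ↔
      x ∈ S ∨ (2 < PySem.Str.len (pvSub expr k q) ∧ x = pvSub expr k q) := by
  simp only [pvStepB, hm]
  rw [if_pos trivial]
  unfold pvSub
  split_ifs with h
  · rw [PySem.Set.mem_add]
    exact or_congr Iff.rfl ⟨fun hx => ⟨h, hx⟩, fun hx => hx.2⟩
  · constructor
    · exact fun hS => Or.inl hS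
    · rintro (hS | ⟨hlen, -⟩)
      · exact hS
      · exact absurd hlen h

theorem pvMemB (expr : String) : ∀ (l : List Char) (k : Int) (S : PySem.Set String) (x : String),
    x ∈ (PySem.List.enumerate l k).foldl (pvStepB expr) S ↔ x ∈ S ∨ pvPairB expr l k x := by
  intro l
  induction l with
  | nil =>
    intro k S x
    rw [PySem.List.enumerate_nil]
    exact (or_iff_left (pvPairB_nil expr k x)).symm
  | cons c rest ih =>
    intro k S x
    rw [PySem.List.enumerate_cons, List.foldl_cons, ih, pvPairB_cons]
    by_cases h1 : c = '('
    · subst h1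
      cases hm : pvScan (expr.toList.drop (k + 1).toNat) 1 with
      | none =>
        rw [pvStepB_open_none expr S k hm]
        constructor
        · rintro (hS | hp)
          · exact Or.inl hS
          · exact Or.inr (Or.inr hp)
        · rintro (hS | (⟨-, q, hscan, -⟩ | hp))
          · exact Or.inl hS
          · simp at hscan
          · exact Or.inr hp
      | some q =>
        rw [pvStepB_open_mem expr S k q x hm]
        constructor
        · rintro ((hS | ⟨hlen, hx⟩) | hp)
          · exact Or.inl hS
          · exact Or.inr (Or.inl ⟨rfl, q, rfl, hlen, hx⟩)
          · exact Or.inr (Or.inr hp)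
        · rintro (hS | (⟨-, q', hscan, hlen, hx⟩ | hp))
          · exact Or.inl (Or.inl hS)
          · have : q' = q := by simpa using hscan.symm
            subst this
            exact Or.inl (Or.inr ⟨hlen, hx⟩)
          · exact Or.inr hp
    · rw [pvStepB_not_open expr S k h1]
      constructor
      · rintro (hS | hp)
        · exact Or.inl hS
        · exact Or.inr (Or.inr hp)
      · rintro (hS | (⟨hc, -⟩ | hp))
        · exact Or.inl hS
        · exact absurd hc h1
        · exact Or.inr hp
-- === top-level bridges ===
theorem pvPairB_top (expr : String) (x : String) :
    pvPairB expr expr.toList 0 x ↔ pvPairAt expr expr.toList 0 x := by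
  unfold pvPairB pvPairAt
  constructor
  · rintro ⟨i, q, hopen, hscan, hlen, hx⟩
    refine ⟨i, q, hopen, ?_, hlen, hx⟩
    rwa [show ((0 : Int) + (i : Int) + 1).toNat = i + 1 from by omega] at hscan
  · rintro ⟨i, q, hopen, hscan, hlen, hx⟩
    refine ⟨i, q, hopen, ?_, hlen, hx⟩
    rwa [show ((0 : Int) + (i : Int) + 1).toNat = i + 1 from by omega]

theorem pvPairs_mem (expr : String) (x : String) :
    x ∈ pvPairs expr ↔ pvPairAt expr expr.toList 0 x := by
  unfold pvPairs pvPairAt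
  rw [PySem.Set.mem_ofList, List.mem_filterMap]
  constructor
  · rintro ⟨i, hi, hfi⟩
    split_ifs at hfi with hopen
    · cases hq : pvScan (expr.toList.drop (i + 1)) 1 with
      | none => rw [hq] at hfi; simp at hfi
      | some q =>
        rw [hq] at hfi
        simp only [Option.bind_some] at hfi
        split_ifs at hfi with hlen
        · simp only [Option.some_inj] at hfi
          refine ⟨i, q, hopen, hq, ?_, ?_⟩
          · unfold pvSub
            rwa [show ((0 : Int) + (i : Int)) = (i : Int) from by ring]
          · unfold pvSub
            rw [show ((0 : Int) + (i : Int)) = (i : Int) from by ring]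
            exact hfi.symm
  · rintro ⟨i, q, hopen, hscan, hlen, hx⟩
    have hilen : i < expr.toList.length := by
      rcases List.getElem?_eq_some_iff.mp hopen with ⟨h, -⟩
      exact h
    have hlen' : 2 < PySem.Str.len (PySem.Str.slice expr (some (i : Int))
        (some ((i : Int) + (q : Int) + 2))) := by
      unfold pvSub at hlen
      rwa [show ((0 : Int) + (i : Int)) = (i : Int) from by ring] at hlen
    have hx' : x = PySem.Str.slice expr (some (i : Int)) (some ((i : Int) + (q : Int) + 2)) := by
      unfold pvSub at hx
      rwa [show ((0 : Int) + (i : Int)) = (i : Int) from by ring] at hx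
    refine ⟨i, List.mem_range.mpr hilen, ?_⟩
    rw [if_pos hopen, hscan]
    simp only [Option.bind_some]
    rw [if_pos hlen']
    exact congrArg some hx'.symm

-- === nodup ===
theorem pvNodupA (expr : String) : ∀ (l : List Char) (k : Int) (S : PySem.Set String)
    (st : List Int), S.Nodup → ((pvFoldA expr l k (S, st)).1).Nodup := by
  intro l
  induction l with
  | nil => intro k S st h; rw [pvFoldA_nil]; exact h
  | cons c rest ih =>
    intro k S st h
    rw [pvFoldA_cons]
    by_cases h1 : c = '('
    · subst h1; rw [pvStepA_open]; exact ih _ _ _ h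
    · by_cases h2 : c = ')'
      · subst h2
        match st with
        | [] => rw [pvStepA_close_nil]; exact ih _ _ _ h
        | i :: st' =>
          rw [pvStepA_close_cons]
          refine ih _ _ _ ?_
          unfold pvAdd
          split_ifs
          · exact PySem.Set.nodup_add _ _ h
          · exact h
      · rw [pvStepA_other expr S st k h1 h2]; exact ih _ _ _ h

theorem pvStepB_open_some_eq (expr : String) (S : PySem.Set String) (k : Int) (q : Nat)
    (hm : pvScan (expr.toList.drop (k + 1).toNat) 1 = some q) :
    pvStepB expr S (k, '(') =
      if 2 < PySem.Str.len (pvSub expr k q) then PySem.Set.add S (pvSub expr k q) else S := by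
  simp only [pvStepB, hm]
  rw [if_pos trivial]
  rfl

theorem pvNodupB (expr : String) : ∀ (l : List Char) (k : Int) (S : PySem.Set String),
    S.Nodup → ((PySem.List.enumerate l k).foldl (pvStepB expr) S).Nodup := by
  intro l
  induction l with
  | nil => intro k S h; rw [PySem.List.enumerate_nil]; exact h
  | cons c rest ih =>
    intro k S h
    rw [PySem.List.enumerate_cons, List.foldl_cons]
    refine ih _ _ ?_
    by_cases h1 : c = '('
    · subst h1
      cases hm : pvScan (expr.toList.drop (k + 1).toNat) 1 with
      | none => rw [pvStepB_open_none expr S k hm]; exact h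
      | some q =>
        rw [pvStepB_open_some_eq expr S k q hm]
        split_ifs
        · exact PySem.Set.nodup_add _ _ h
        · exact h
    · rw [pvStepB_not_open expr S k h1]; exact h

-- === assembly ===
theorem pvPortA_eq (expr : String) :
    generate_subexpressions expr =
      PySem.List.sorted (pvFoldA expr expr.toList 0 (PySem.Set.empty, [])).1
        (fun s => PySem.Str.len s) := rfl

theorem pvPortB_eq (expr : String) :
    generate_subexpressions_alt expr =
      PySem.List.sorted ((PySem.List.enumerate expr.toList 0).foldl (pvStepB expr)
        PySem.Set.empty) (fun s => PySem.Str.len s) := rfl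

-- ===== VERDICT (by name: the statement is the Claim_ definition above) =====
theorem generate_subexpressions_spec : Claim_equal_generate_subexpressions := by
  unfold Claim_equal_generate_subexpressions
  intro expr hdom hpre
  unfold Spec_generate_subexpressions
  rw [pvPortA_eq, pvPortB_eq]
  have hmemA : ∀ x, x ∈ (pvFoldA expr expr.toList 0 (PySem.Set.empty, [])).1 ↔
      pvPairAt expr expr.toList 0 x := by
    intro x
    rw [pvMemA expr expr.toList.length expr.toList le_rfl 0 PySem.Set.empty x]
    simp [PySem.Set.empty]
  have hmemB : ∀ x, x ∈ (PySem.List.enumerate expr.toList 0).foldl (pvStepB expr)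
      PySem.Set.empty ↔ pvPairAt expr expr.toList 0 x := by
    intro x
    rw [pvMemB expr expr.toList 0 PySem.Set.empty x, ← pvPairB_top expr x]
    simp [PySem.Set.empty]
  have hnodA := pvNodupA expr expr.toList 0 PySem.Set.empty [] List.nodup_nil
  have hnodB := pvNodupB expr expr.toList 0 PySem.Set.empty List.nodup_nil
  have hperm : (pvFoldA expr expr.toList 0 (PySem.Set.empty, [])).1.Perm
      ((PySem.List.enumerate expr.toList 0).foldl (pvStepB expr) PySem.Set.empty) :=
    (List.perm_ext_iff_of_nodup hnodA hnodB).mpr (fun a => by rw [hmemA, hmemB])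
  have hnodP : (pvPairs expr).Nodup := by
    unfold pvPairs; exact PySem.Set.nodup_ofList _
  have hpairs : ((PySem.List.enumerate expr.toList 0).foldl (pvStepB expr)
      PySem.Set.empty).Perm (pvPairs expr) :=
    (List.perm_ext_iff_of_nodup hnodB hnodP).mpr
      (fun a => by rw [hmemB, pvPairs_mem])
  unfold Pre_generate_subexpressions at hpre
  have hlenB : (((PySem.List.enumerate expr.toList 0).foldl (pvStepB expr)
      PySem.Set.empty).map (fun s => PySem.Str.len s)).Nodup :=
    ((hpairs.map (fun s => PySem.Str.len s)).nodup_iff).mpr hpre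
  have h1 := PySem.List.sorted_perm ((PySem.List.enumerate expr.toList 0).foldl
    (pvStepB expr) PySem.Set.empty) (fun s => PySem.Str.len s) false
  have h2 := PySem.List.sorted_pairwise ((PySem.List.enumerate expr.toList 0).foldl
    (pvStepB expr) PySem.Set.empty) (fun s => PySem.Str.len s)
  have h3 : ((PySem.List.sorted ((PySem.List.enumerate expr.toList 0).foldl (pvStepB expr)
      PySem.Set.empty) (fun s => PySem.Str.len s)).map (fun s => PySem.Str.len s)).Nodup :=
    ((h1.map (fun s => PySem.Str.len s)).nodup_iff).mpr hlenB
  have hne := List.pairwise_map.mp h3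
  have h4 := (h2.and hne).imp (fun hab => lt_of_le_of_ne hab.1 hab.2)
  exact PySem.List.sorted_eq_of_perm_of_pairwise_lt _ _ _ (h1.trans hperm.symm) h4
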